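-- pv_equiv track=rewrite | github.com/Hattorius/ccc-38 | classic/level6/6.py | findIslandSpotsToGo
-- ===== SOURCE A (Python) =====
-- def findIslandSpotsToGo(fullIsland):
--     lowestX = [99999, 0]
--     lowestY = [0, 99999]
--     highestX = [0, 0]
--     highestY = [0, 0]
--
--     for point in fullIsland:
--         if point[0] < lowestX[0]:
--             lowestX = point
--         if point[0] > highestX[0]:
--             highestX = point
--         if point[1] < lowestY[1]:
--             lowestY = point
--         if point[1] > highestY[1]:
--             highestY = point
--
--     return [[lowestY[0], lowestY[1] - 1], [highestX[0] + 1, highestX[1]], [highestY[0], highestY[1] + 1], [lowestX[0] - 1, lowestX[1]]]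
-- ===== SOURCE B (Python) =====
-- def findIslandSpotsToGo(fullIsland):
--     # Divide and conquer: recursively compute the four extreme points
--     # (leftmost-x, lowest-y, rightmost-x, highest-y) of each half and merge
--     # them, the earlier half winning ties; the merged result is finally
--     # clamped against the fixed fallback extremes (also the answer for an
--     # empty island).
--     def better(a, b):
--         return (a[0] if a[0][0] <= b[0][0] else b[0],
--                 a[1] if a[1][1] <= b[1][1] else b[1],
--                 a[2] if a[2][0] >= b[2][0] else b[2],
--                 a[3] if a[3][1] >= b[3][1] else b[3])
--
--     def extremes(pts):
--         if len(pts) == 1: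
--             p = pts[0]
--             return (p, p, p, p)
--         mid = len(pts) // 2
--         return better(extremes(pts[:mid]), extremes(pts[mid:]))
--
--     fallback = ([99999, 0], [0, 99999], [0, 0], [0, 0])
--     lx, ly, hx, hy = better(fallback, extremes(fullIsland)) if fullIsland else fallback
--     return [[ly[0], ly[1] - 1], [hx[0] + 1, hx[1]],
--             [hy[0], hy[1] + 1], [lx[0] - 1, lx[1]]]
-- ===== Notes on version B (the rewrite author's own statement) =====
-- stated objective: alternative
-- what changed: The single fused four-accumulator scan is replaced by a divide-and-conquer recursion that computes the four extreme points of each half of the list and merges them (earlier half wins ties), clamping the merged result once against the fixed fallback extremes; Pre_ excludes points with fewer than two coordinates, on which A raises IndexError.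
import Mathlib
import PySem

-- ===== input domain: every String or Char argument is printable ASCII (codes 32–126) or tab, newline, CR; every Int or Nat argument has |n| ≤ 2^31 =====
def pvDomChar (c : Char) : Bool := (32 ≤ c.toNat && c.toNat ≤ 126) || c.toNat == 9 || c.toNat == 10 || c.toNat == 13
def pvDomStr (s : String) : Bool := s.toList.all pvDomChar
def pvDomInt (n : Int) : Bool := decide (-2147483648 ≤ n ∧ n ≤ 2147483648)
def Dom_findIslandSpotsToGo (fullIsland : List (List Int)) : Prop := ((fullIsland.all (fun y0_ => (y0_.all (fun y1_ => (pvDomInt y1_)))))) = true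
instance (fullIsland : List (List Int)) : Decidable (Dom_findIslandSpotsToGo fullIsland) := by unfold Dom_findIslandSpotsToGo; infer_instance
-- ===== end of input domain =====

-- B replaces A's fused four-accumulator linear scan by a divide-and-conquer
-- recursion merging the extreme points of the two halves (alternative algorithm).

-- p[0] / p[1]: exact under Pre_ (every point has length ≥ 2, so pyGet? is some);
-- shared by both ports as the subscript primitive.
def pvG0 (p : List Int) : Int := (PySem.List.pyGet? p 0).getD 0
def pvG1 (p : List Int) : Int := (PySem.List.pyGet? p 1).getD 0

-- ===== PORT A =====
-- the body of A's for-loop: the four ifs updating (lowestX, lowestY, highestX, highestY)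
def pvStep (s : List Int × List Int × List Int × List Int) (point : List Int) :
    List Int × List Int × List Int × List Int :=
  (if pvG0 point < pvG0 s.1 then point else s.1,
   if pvG1 point < pvG1 s.2.1 then point else s.2.1,
   if pvG0 point > pvG0 s.2.2.1 then point else s.2.2.1,
   if pvG1 point > pvG1 s.2.2.2 then point else s.2.2.2)

def findIslandSpotsToGo (fullIsland : List (List Int)) : List (List Int) :=
  let st := fullIsland.foldl pvStep ([99999, 0], [0, 99999], [0, 0], [0, 0])
  [[pvG0 st.2.1, pvG1 st.2.1 - 1], [pvG0 st.2.2.1 + 1, pvG1 st.2.2.1],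
   [pvG0 st.2.2.2, pvG1 st.2.2.2 + 1], [pvG0 st.1 - 1, pvG1 st.1]]

-- ===== PORT B =====
-- better(a, b): componentwise choice of the more extreme point, a (the earlier half) winning ties
def pvBetter (a b : List Int × List Int × List Int × List Int) :
    List Int × List Int × List Int × List Int :=
  (if pvG0 a.1 ≤ pvG0 b.1 then a.1 else b.1,
   if pvG1 a.2.1 ≤ pvG1 b.2.1 then a.2.1 else b.2.1,
   if pvG0 a.2.2.1 ≥ pvG0 b.2.2.1 then a.2.2.1 else b.2.2.1,
   if pvG1 a.2.2.2 ≥ pvG1 b.2.2.2 then a.2.2.2 else b.2.2.2)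

-- extremes(pts); B only calls it on nonempty pts, the [] branch is a totality filler.
-- pts[:mid] / pts[mid:] with 0 ≤ mid ≤ len are exactly take/drop.
def pvExtremes (pts : List (List Int)) : List Int × List Int × List Int × List Int :=
  if h : pts.length ≤ 1 then
    match pts with
    | [] => ([], [], [], [])
    | p :: _ => (p, p, p, p)
  else
    pvBetter (pvExtremes (pts.take (pts.length / 2))) (pvExtremes (pts.drop (pts.length / 2)))
termination_by pts.length
decreasing_by
  · simp only [List.length_take]; omega
  · simp only [List.length_drop]; omega

def findIslandSpotsToGo_alt (fullIsland : List (List Int)) : List (List Int) :=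
  let fallback : List Int × List Int × List Int × List Int :=
    ([99999, 0], [0, 99999], [0, 0], [0, 0])
  let st := if fullIsland.isEmpty then fallback else pvBetter fallback (pvExtremes fullIsland)
  [[pvG0 st.2.1, pvG1 st.2.1 - 1], [pvG0 st.2.2.1 + 1, pvG1 st.2.2.1],
   [pvG0 st.2.2.2, pvG1 st.2.2.2 + 1], [pvG0 st.1 - 1, pvG1 st.1]]

-- ===== PRECONDITION & SPEC =====
-- Pre_: every point has both coordinates; on shorter points the Python A raises IndexError.
def Pre_findIslandSpotsToGo (fullIsland : List (List Int)) : Prop :=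
  ∀ p ∈ fullIsland, 2 ≤ p.length
instance (fullIsland : List (List Int)) : Decidable (Pre_findIslandSpotsToGo fullIsland) := by unfold Pre_findIslandSpotsToGo; infer_instance
def pvWitness_findIslandSpotsToGo : List (List Int) := [[1, 2], [3, 4], [0, 7]]

def Spec_findIslandSpotsToGo (fullIsland : List (List Int)) (out : List (List Int)) : Prop := out = findIslandSpotsToGo_alt fullIsland
instance (fullIsland : List (List Int)) (out : List (List Int)) : Decidable (Spec_findIslandSpotsToGo fullIsland out) := by unfold Spec_findIslandSpotsToGo; infer_instance

-- ===== CLAIM (what is proved, stated in full; the proofs are below) =====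
def Claim_equal_findIslandSpotsToGo : Prop := ∀ (fullIsland : List (List Int)), Dom_findIslandSpotsToGo fullIsland → Pre_findIslandSpotsToGo fullIsland → Spec_findIslandSpotsToGo fullIsland (findIslandSpotsToGo fullIsland)

-- ===== LEMMAS AND PROOFS =====

-- merging one more point on the right is exactly one step of A's loop
theorem pvBetter_quad (d p : List Int × List Int × List Int × List Int) :
    pvBetter d (p.1, p.1, p.1, p.1) = pvStep (d.1, d.2.1, d.2.2.1, d.2.2.2) p.1 := by
  simp only [pvBetter, pvStep]
  refine Prod.ext ?_ (Prod.ext ?_ (Prod.ext ?_ ?_)) <;> simp <;> split_ifs <;>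
    first | rfl | (exfalso; omega)

-- pvBetter is associative (componentwise: ties resolve leftmost in both groupings)
theorem pvBetter_assoc (a b c : List Int × List Int × List Int × List Int) :
    pvBetter a (pvBetter b c) = pvBetter (pvBetter a b) c := by
  simp only [pvBetter]
  refine Prod.ext ?_ (Prod.ext ?_ (Prod.ext ?_ ?_)) <;> simp <;> split_ifs <;>
    first | rfl | (exfalso; omega)

-- the divide-and-conquer extremes, merged into any accumulator d, equal A's left fold from d
theorem pvExtremes_fold :
    ∀ (n : Nat) (pts : List (List Int)), pts.length ≤ n → pts ≠ [] →
      ∀ d, pvBetter d (pvExtremes pts) = pts.foldl pvStep d := by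
  intro n
  induction n with
  | zero => intro pts h hne; cases pts <;> simp_all
  | succ n ih =>
    intro pts h hne d
    rw [pvExtremes]
    by_cases h1 : pts.length ≤ 1
    · rw [dif_pos h1]
      match pts, hne with
      | p :: rest, _ =>
        have : rest = [] := by
          cases rest with
          | nil => rfl
          | cons q t => simp at h1
        subst this
        simpa using pvBetter_quad d (p, p, p, p)
    · rw [dif_neg h1]
      have h2 : 2 ≤ pts.length := by omega
      have htake : (pts.take (pts.length / 2)).length ≤ n := by
        simp only [List.length_take]; omega
      have hdrop : (pts.drop (pts.length / 2)).length ≤ n := by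
        simp only [List.length_drop]; omega
      have htne : pts.take (pts.length / 2) ≠ [] := by
        intro hc
        have := congrArg List.length hc
        simp only [List.length_take, List.length_nil] at this
        omega
      have hdne : pts.drop (pts.length / 2) ≠ [] := by
        intro hc
        have := congrArg List.length hc
        simp only [List.length_drop, List.length_nil] at this
        omega
      rw [pvBetter_assoc, ih _ htake htne d, ih _ hdrop hdne,
          ← List.foldl_append, List.take_append_drop]

-- ===== VERDICT (by name: the statement is the Claim_ definition above) =====
theorem findIslandSpotsToGo_spec : Claim_equal_findIslandSpotsToGo := by
  intro l _ _
  unfold Spec_findIslandSpotsToGo findIslandSpotsToGo findIslandSpotsToGo_alt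
  cases l with
  | nil => rfl
  | cons p t =>
    simp only [List.isEmpty_cons, Bool.false_eq_true, if_false]
    rw [pvExtremes_fold (p :: t).length (p :: t) le_rfl (by simp)]
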